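-- pv_equiv track=rewrite | github.com/neozt/leetcode | python/1717.py | maximumGain
-- ===== SOURCE A (Python) =====
-- def maximumGain(s: str, x: int, y: int) -> int:
--     top = 'ab'
--     bot = 'ba'
--     top_score = x
--     bot_score = y
--     if top_score < bot_score:
--         top_score, bot_score = bot_score, top_score
--         top, bot = bot, top
--
--     stack = []
--     result = 0
--
--     for ch in s:
--         if ch == top[1] and stack and stack[-1] == top[0]:
--             stack.pop()
--             result += top_score
--         else:
--             stack.append(ch)
--
--     stack2 = []
--     for ch in stack:
--         if ch == bot[1] and stack2 and stack2[-1] == bot[0]: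
--             stack2.pop()
--             result += bot_score
--         else:
--             stack2.append(ch)
--
--     return result
-- ===== SOURCE B (Python) =====
-- def maximumGain(s: str, x: int, y: int) -> int:
--     # One pass with two counters per block instead of two explicit stacks.
--     if x >= y:
--         hi, lo, first_ch, second_ch = x, y, 'a', 'b'
--     else:
--         hi, lo, first_ch, second_ch = y, x, 'b', 'a'
--     result = first = leftover = 0
--     for ch in s:
--         if ch == first_ch:
--             first += 1
--         elif ch == second_ch:
--             if first > 0:
--                 first -= 1
--                 result += hi
--             else:
--                 leftover += 1
--         else:
--             result += min(first, leftover) * lo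
--             first = leftover = 0
--     return result + min(first, leftover) * lo
-- ===== Notes on version B (the rewrite author's own statement) =====
-- stated objective: simpler
-- what changed: Replaces A's two explicit character stacks (build a stack removing top pairs, then rescan it for bottom pairs) with a single pass over s that keeps two integer counters per maximal 'a'/'b' block, scoring bottom pairs with min(first, leftover) at each block flush.
import Mathlib
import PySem

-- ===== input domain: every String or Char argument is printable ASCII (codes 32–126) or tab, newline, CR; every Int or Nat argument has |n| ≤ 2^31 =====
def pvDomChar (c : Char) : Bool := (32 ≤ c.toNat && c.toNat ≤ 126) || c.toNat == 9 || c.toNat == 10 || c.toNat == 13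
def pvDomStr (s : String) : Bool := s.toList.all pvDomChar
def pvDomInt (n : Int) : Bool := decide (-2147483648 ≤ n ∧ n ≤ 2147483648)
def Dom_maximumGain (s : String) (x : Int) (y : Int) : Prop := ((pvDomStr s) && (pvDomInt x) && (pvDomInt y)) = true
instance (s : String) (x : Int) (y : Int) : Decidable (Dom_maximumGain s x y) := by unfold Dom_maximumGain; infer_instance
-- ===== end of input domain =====

-- B replaces A's two explicit character stacks by a single pass keeping two
-- integer counters per block, flushed at every non-pair character (objective:
-- simpler; return value only, neither version mutates its arguments).

-- ===== PORT A =====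
-- Python stacks are ported as lists with the HEAD as the stack top (append =
-- cons, stack[-1] = head); Python's left-to-right iteration over the first
-- stack therefore folds over its .reverse.
-- Loop body shared by A's two loops: pop (scoring sc) iff the current char is
-- c1 and the stack top is c0, else push — exactly A's if/else.
def pairStep (c0 c1 : Char) (sc : Int) : List Char × Int → Char → List Char × Int
  | (stack, res), ch =>
    match stack with
    | t :: rest => if ch = c1 ∧ t = c0 then (rest, res + sc) else (ch :: t :: rest, res)
    | [] => ([ch], res)

-- A's code after the swap: top = (t0,t1) scoring ts, bot = (t1,t0) scoring bs.
def aCore (t0 t1 : Char) (ts bs : Int) (s : String) : Int :=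
  let r1 := s.toList.foldl (pairStep t0 t1 ts) ([], 0)
  (r1.1.reverse.foldl (pairStep t1 t0 bs) ([], r1.2)).2

def maximumGain (s : String) (x : Int) (y : Int) : Int :=
  if x < y then aCore 'b' 'a' y x s else aCore 'a' 'b' x y s

-- ===== PORT B =====
-- B's loop body: state (result, first, leftover).
def cntStep (c0 c1 : Char) (hi lo : Int) : Int × Int × Int → Char → Int × Int × Int
  | (res, first, leftover), ch =>
    if ch = c0 then (res, first + 1, leftover)
    else if ch = c1 then
      (if first > 0 then (res + hi, first - 1, leftover) else (res, first, leftover + 1))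
    else (res + min first leftover * lo, 0, 0)

def bCore (c0 c1 : Char) (hi lo : Int) (s : String) : Int :=
  let q := s.toList.foldl (cntStep c0 c1 hi lo) (0, 0, 0)
  q.1 + min q.2.1 q.2.2 * lo

def maximumGain_alt (s : String) (x : Int) (y : Int) : Int :=
  if x ≥ y then bCore 'a' 'b' x y s else bCore 'b' 'a' y x s

-- ===== PRECONDITION & SPEC =====
def Spec_maximumGain (s : String) (x : Int) (y : Int) (out : Int) : Prop := out = maximumGain_alt s x y
instance (s : String) (x : Int) (y : Int) (out : Int) : Decidable (Spec_maximumGain s x y out) := by unfold Spec_maximumGain; infer_instance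

-- ===== CLAIM (what is proved, stated in full; the proofs are below) =====
def Claim_equal_maximumGain : Prop := ∀ (s : String) (x : Int) (y : Int), Dom_maximumGain s x y → Spec_maximumGain s x y (maximumGain s x y)

-- ===== LEMMAS AND PROOFS =====

lemma pairStep_push (c0 c1 : Char) (sc : Int) (stack : List Char) (res : Int) (ch : Char)
    (h : ¬(ch = c1 ∧ stack.head? = some c0)) :
    pairStep c0 c1 sc (stack, res) ch = (ch :: stack, res) := by
  cases stack with
  | nil => rfl
  | cons t rest =>
      simp only [pairStep]
      rw [if_neg]
      rintro ⟨a, b⟩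
      exact h ⟨a, by simp [b]⟩

lemma pairStep_pop (c0 c1 : Char) (sc : Int) (rest : List Char) (res : Int) :
    pairStep c0 c1 sc (c0 :: rest, res) c1 = (rest, res + sc) := by
  simp [pairStep]

lemma cnt_c0 (c0 c1 : Char) (hi lo res first leftover : Int) :
    cntStep c0 c1 hi lo (res, first, leftover) c0 = (res, first + 1, leftover) := by
  simp [cntStep]

lemma cnt_c1_pos (c0 c1 : Char) (hi lo res first leftover : Int)
    (h : ¬ c1 = c0) (hpos : first > 0) :
    cntStep c0 c1 hi lo (res, first, leftover) c1 = (res + hi, first - 1, leftover) := by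
  simp [cntStep, h, hpos]

lemma cnt_c1_zero (c0 c1 : Char) (hi lo res first leftover : Int)
    (h : ¬ c1 = c0) (hz : ¬ first > 0) :
    cntStep c0 c1 hi lo (res, first, leftover) c1 = (res, first, leftover + 1) := by
  simp [cntStep, h, hz]

lemma cnt_other (c0 c1 : Char) (hi lo res first leftover : Int) (ch : Char)
    (h0 : ¬ ch = c0) (h1 : ¬ ch = c1) :
    cntStep c0 c1 hi lo (res, first, leftover) ch
      = (res + min first leftover * lo, 0, 0) := by
  simp [cntStep, h0, h1]

lemma rep_shift (c : Char) (n : Nat) (l : List Char) :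
    List.replicate n c ++ c :: l = c :: (List.replicate n c ++ l) := by
  induction n with
  | zero => simp
  | succ k ih => simp [List.replicate_succ, ih]

-- pushing l copies of c1 in the second pass (never popped since c1 ≠ c0)
lemma pushseg (c0 c1 : Char) (sc : Int) (hne : c0 ≠ c1) :
    ∀ (l : Nat) (st2 : List Char) (r : Int),
    List.foldl (pairStep c1 c0 sc) (st2, r) (List.replicate l c1)
      = (List.replicate l c1 ++ st2, r) := by
  intro l
  induction l with
  | zero => intro st2 r; simp
  | succ n ih =>
      intro st2 r
      rw [List.replicate_succ, List.foldl_cons,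
        pairStep_push _ _ _ _ _ _ (fun hc => hne (Eq.symm hc.1)), ih]
      simp [rep_shift]

-- popping with f copies of c0 against l pending c1's in the second pass
lemma popseg (c0 c1 : Char) (sc : Int) (hne : c0 ≠ c1) :
    ∀ (f l : Nat) (st2 : List Char) (r : Int), st2.head? ≠ some c1 →
    List.foldl (pairStep c1 c0 sc) (List.replicate l c1 ++ st2, r) (List.replicate f c0)
      = ((if f ≤ l then List.replicate (l - f) c1 else List.replicate (f - l) c0) ++ st2,
         r + (min l f : Nat) * sc) := by
  intro f
  induction f with
  | zero => intro l st2 r _; simp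
  | succ n ih =>
      intro l st2 r hst
      cases l with
      | zero =>
          rw [List.replicate_zero, List.nil_append,
            List.replicate_succ (a := c0), List.foldl_cons,
            pairStep_push _ _ _ _ _ _ (fun hc => hst hc.2)]
          have h2 := ih 0 (c0 :: st2) r (by simp; exact fun hh => hne hh)
          simp only [List.replicate_zero, List.nil_append] at h2
          rw [h2]
          cases n with
          | zero => simp
          | succ m =>
              rw [if_neg (by omega), if_neg (by omega)]
              simp [List.replicate_succ, rep_shift]
      | succ m =>
          rw [List.replicate_succ (a := c0), List.foldl_cons,
            List.replicate_succ (a := c1), List.cons_append, pairStep_pop,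
            ih m st2 (r + sc) hst]
          have hmin : min (m + 1) (n + 1) = min m n + 1 := by omega
          have h1 : (m + 1 - (n + 1)) = m - n := by omega
          have h2 : (n + 1 - (m + 1)) = n - m := by omega
          simp only [hmin, h1, h2, Nat.add_le_add_iff_right]
          have harith : r + sc + ((min m n : Nat) : Int) * sc
              = r + ((min m n + 1 : Nat) : Int) * sc := by push_cast; ring
          rw [harith]

lemma seg (c0 c1 : Char) (sc : Int) (hne : c0 ≠ c1)
    (l f : Nat) (st2 : List Char) (r : Int) (hst : st2.head? ≠ some c1) :
    List.foldl (pairStep c1 c0 sc) (st2, r) (List.replicate l c1 ++ List.replicate f c0)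
      = ((if f ≤ l then List.replicate (l - f) c1 else List.replicate (f - l) c0) ++ st2,
         r + (min l f : Nat) * sc) := by
  rw [List.foldl_append, pushseg c0 c1 sc hne, popseg c0 c1 sc hne f l st2 r hst]

-- Main invariant: A's stack is c0^f ++ c1^l ++ base where base is the flushed
-- part, whose second-pass effect from an empty stack is (st2, +p2); B's state
-- is (rB, f, l) with rB = rA + p2.
lemma main_inv (c0 c1 : Char) (hi lo : Int) (hne : c0 ≠ c1) :
    ∀ (s : List Char) (f l : Nat) (base st2 : List Char) (p2 rA rB : Int),
    base.head? ≠ some c0 →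
    st2.head? ≠ some c1 →
    (∀ r : Int, List.foldl (pairStep c1 c0 lo) ([], r) base.reverse = (st2, r + p2)) →
    rB = rA + p2 →
    (List.foldl (pairStep c1 c0 lo)
        ([], (List.foldl (pairStep c0 c1 hi)
            (List.replicate f c0 ++ List.replicate l c1 ++ base, rA) s).2)
        (List.foldl (pairStep c0 c1 hi)
            (List.replicate f c0 ++ List.replicate l c1 ++ base, rA) s).1.reverse).2
    = (List.foldl (cntStep c0 c1 hi lo) (rB, (f : Int), (l : Int)) s).1
      + min (List.foldl (cntStep c0 c1 hi lo) (rB, (f : Int), (l : Int)) s).2.1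
            (List.foldl (cntStep c0 c1 hi lo) (rB, (f : Int), (l : Int)) s).2.2 * lo := by
  intro s
  induction s with
  | nil =>
      intro f l base st2 p2 rA rB hb hst hbase hr
      simp only [List.foldl_nil, List.reverse_append, List.reverse_replicate,
        List.append_assoc]
      rw [List.foldl_append, hbase rA, seg c0 c1 lo hne l f st2 _ hst]
      show rA + p2 + ((min l f : Nat) : Int) * lo = rB + min ((f : Int)) ((l : Int)) * lo
      have hmm : min ((f : Int)) ((l : Int)) = ((min l f : Nat) : Int) := by
        push_cast; omega
      rw [hmm, hr]
  | cons ch s ih =>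
      intro f l base st2 p2 rA rB hb hst hbase hr
      simp only [List.foldl_cons]
      by_cases h0 : ch = c0
      · subst h0
        rw [pairStep_push _ _ _ _ _ _ (fun hc => hne hc.1), cnt_c0,
          show ch :: (List.replicate f ch ++ List.replicate l c1 ++ base)
              = List.replicate (f + 1) ch ++ List.replicate l c1 ++ base by
            simp [List.replicate_succ],
          show (f : Int) + 1 = ((f + 1 : Nat) : Int) by push_cast; ring]
        exact ih (f + 1) l base st2 p2 rA rB hb hst hbase hr
      · by_cases h1 : ch = c1
        · subst h1
          cases f with
          | succ n =>
              simp only [List.replicate_succ (a := c0), List.cons_append]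
              rw [pairStep_pop,
                cnt_c1_pos c0 ch hi lo _ _ _ h0 (by push_cast; omega),
                show (((n + 1 : Nat)) : Int) - 1 = (n : Int) by push_cast; ring]
              exact ih n l base st2 p2 (rA + hi) (rB + hi) hb hst hbase (by omega)
          | zero =>
              rw [List.replicate_zero, List.nil_append,
                pairStep_push _ _ _ _ _ _ (by
                  rintro ⟨-, h2⟩
                  cases l with
                  | zero =>
                      simp only [List.replicate_zero, List.nil_append] at h2
                      exact hb h2
                  | succ m =>
                      rw [List.replicate_succ, List.cons_append] at h2
                      simp only [List.head?_cons, Option.some.injEq] at h2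
                      exact h0 h2),
                cnt_c1_zero c0 ch hi lo _ _ _ h0 (by simp),
                show ch :: (List.replicate l ch ++ base)
                    = List.replicate 0 c0 ++ List.replicate (l + 1) ch ++ base by
                  simp [List.replicate_succ]]
              have := ih 0 (l + 1) base st2 p2 rA rB hb hst hbase hr
              simpa using this
        · -- flush: ch starts a new block on both sides
          rw [pairStep_push _ _ _ _ _ _ (fun hc => h1 hc.1),
            cnt_other c0 c1 hi lo _ _ _ ch h0 h1]
          have hbase' : ∀ r : Int,
              List.foldl (pairStep c1 c0 lo) ([], r)
                (ch :: (List.replicate f c0 ++ List.replicate l c1 ++ base)).reverse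
              = (ch :: ((if f ≤ l then List.replicate (l - f) c1
                         else List.replicate (f - l) c0) ++ st2),
                 r + (p2 + ((min l f : Nat) : Int) * lo)) := by
            intro r
            simp only [List.reverse_cons, List.reverse_append, List.reverse_replicate,
              List.append_assoc]
            rw [List.foldl_append, hbase r,
              ← List.append_assoc (List.replicate l c1) (List.replicate f c0) [ch],
              List.foldl_append, seg c0 c1 lo hne l f st2 _ hst, List.foldl_cons,
              List.foldl_nil, pairStep_push _ _ _ _ _ _ (fun hc => h0 hc.1),
              Int.add_assoc]
          have hmm : min ((f : Int)) ((l : Int)) = ((min l f : Nat) : Int) := by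
            push_cast; omega
          have := ih 0 0 (ch :: (List.replicate f c0 ++ List.replicate l c1 ++ base))
            (ch :: ((if f ≤ l then List.replicate (l - f) c1
                     else List.replicate (f - l) c0) ++ st2))
            (p2 + ((min l f : Nat) : Int) * lo) rA
            (rB + min ((f : Int)) ((l : Int)) * lo)
            (by simpa using h0) (by simpa using h1) hbase'
            (by rw [hr, hmm]; ring)
          simpa using this

lemma core_eq (c0 c1 : Char) (hi lo : Int) (hne : c0 ≠ c1) (s : String) :
    aCore c0 c1 hi lo s = bCore c0 c1 hi lo s := by
  have := main_inv c0 c1 hi lo hne s.toList 0 0 [] [] 0 0 0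
    (by simp) (by simp) (by intro r; simp) (by simp)
  simpa [aCore, bCore] using this

-- ===== VERDICT (by name: the statement is the Claim_ definition above) =====
theorem maximumGain_spec : Claim_equal_maximumGain := by
  intro s x y _
  unfold Spec_maximumGain maximumGain maximumGain_alt
  by_cases h : x < y
  · rw [if_pos h, if_neg (by omega), core_eq _ _ _ _ (by decide)]
  · rw [if_neg h, if_pos (by omega), core_eq _ _ _ _ (by decide)]
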